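-- pv_equiv track=rewrite | github.com/SamBillmore/AdventOfCode | advent_of_code/day_10/solutions/day_10_puzzle_2.py | check_incomplete_single_row
-- ===== SOURCE A (Python) =====
-- from typing import List, Optional
--
-- def check_incomplete_single_row(row: str) -> Optional[str]:
--     closing_characters = [')',']','}','>']
--     character_pairs = {
--         ')': '(',
--         ']': '[',
--         '}': '{',
--         '>': '<'
--     }
--     row_length = len(row)
--     position_index = 0
--     for _ in range(0, row_length):
--         if row[position_index] in closing_characters:
--             if row[position_index - 1] != character_pairs[row[position_index]]:
--                 return None
--             else:
--                 row = row.replace(character_pairs[row[position_index]] + row[position_index], '', 1)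
--                 position_index = position_index - 1
--         else:
--             position_index = position_index + 1
--     return row
-- ===== SOURCE B (Python) =====
-- def check_incomplete_single_row(row):
--     pairs = {')': '(', ']': '[', '}': '{', '>': '<'}
--     stack = []
--     for ch in row:
--         if ch in pairs:
--             if not stack or stack.pop() != pairs[ch]:
--                 return None
--         else:
--             stack.append(ch)
--     return ''.join(stack)
-- ===== Notes on version B (the rewrite author's own statement) =====
-- stated objective: faster
-- what changed: Replaces A's repeated in-place string scanning (indexing with a moving cursor plus str.replace rebuilding the string for every matched pair) by a single left-to-right pass over the characters with an explicit stack of pending openers.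
-- intended difference: On rows with a balanced bracket prefix followed by a closing bracket whose opener is the row's last character, A's row[position_index - 1] wraps around to the end of the string and A returns leftover text such as ')(' instead of None; B returns None, the intended corrupted-line answer. — e.g. on check_incomplete_single_row(")("): A returns some ")(", B returns none
import Mathlib
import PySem

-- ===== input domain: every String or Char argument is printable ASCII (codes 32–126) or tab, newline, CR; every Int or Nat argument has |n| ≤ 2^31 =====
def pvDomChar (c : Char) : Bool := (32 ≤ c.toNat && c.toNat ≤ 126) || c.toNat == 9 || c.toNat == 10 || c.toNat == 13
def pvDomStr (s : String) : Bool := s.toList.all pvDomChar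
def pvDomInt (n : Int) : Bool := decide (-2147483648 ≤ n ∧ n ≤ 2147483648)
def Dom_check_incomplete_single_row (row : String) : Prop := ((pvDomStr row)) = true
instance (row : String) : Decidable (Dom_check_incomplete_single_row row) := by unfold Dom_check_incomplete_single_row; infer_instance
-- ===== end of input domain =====

-- B replaces A's quadratic cursor-and-str.replace reduction by a single pass with an explicit
-- stack of pending openers; on a closer met with no pending opener B reports corruption (None)
-- where A's row[position_index - 1] wraps around to the end of the string (see D_ below).

-- the fixed 4-entry dict {')':'(', ']':'[', '}':'{', '>':'<'}, ported as a direct lookup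
-- (used by both ports and by D_; exact: literal dict, no duplicate keys)
def pvMatchOpen : Char → Option Char
  | ')' => some '('
  | ']' => some '['
  | '}' => some '{'
  | '>' => some '<'
  | _   => none

-- ===== PORT A =====
-- closing_characters
def pvClosers : List Char := [')', ']', '}', '>']
-- character_pairs[c]; the default is irrelevant: A only subscripts the dict with a closer (no KeyError)
def pvPairA (c : Char) : Char := (pvMatchOpen c).getD ' '
-- exact port of row.replace(pat, '', 1) for the 2-character pattern pat = [a, b] used by A
def pvRemoveFirst2 (a b : Char) : List Char → List Char
  | x :: y :: l => if x = a ∧ y = b then l else x :: pvRemoveFirst2 a b (y :: l)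
  | l => l
-- the Python for-loop over range(0, row_length); fuel = remaining iterations;
-- pyGet? = none would be an IndexError, which no input reaches (the loop body keeps the
-- index in range, see the proofs below); Python's control flow is otherwise followed literally
def pvLoopA : Nat → List Char → Int → Option (List Char)
  | 0, row, _ => some row
  | n + 1, row, idx =>
    match PySem.List.pyGet? row idx with
    | none => none
    | some ch =>
      if ch ∈ pvClosers then
        match PySem.List.pyGet? row (idx - 1) with
        | none => none
        | some prev =>
          if prev ≠ pvPairA ch then none
          else pvLoopA n (pvRemoveFirst2 (pvPairA ch) ch row) (idx - 1)
      else pvLoopA n row (idx + 1)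

def check_incomplete_single_row (row : String) : Option String :=
  (pvLoopA row.toList.length row.toList 0).map String.mk

-- ===== PORT B =====
-- Source B's loop: stack of pending openers, top first ('ch in pairs' / 'pairs[ch]' = pvMatchOpen)
def pvLoopB : List Char → List Char → Option (List Char)
  | stack, [] => some stack.reverse
  | stack, c :: r =>
    match pvMatchOpen c with
    | some p =>
      match stack with
      | [] => none
      | t :: s => if t ≠ p then none else pvLoopB s r
    | none => pvLoopB (c :: stack) r

def check_incomplete_single_row_alt (row : String) : Option String :=
  (pvLoopB [] row.toList).map String.mk

-- ===== PRECONDITION & SPEC =====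
-- pvBalanced l: l is a fully matched bracket string (standard balanced-brackets check;
-- a failed pop leaves the unmatchable sentinel [' '], so only a clean reduction ends empty)
def pvBalanced (l : List Char) : Prop :=
  l.foldl (fun st c =>
    match pvMatchOpen c with
    | some p => if st.head? = some p then st.tail else [' ']
    | none => c :: st) [] = []

-- On rows consisting of a balanced bracket prefix followed by a closing bracket whose opener
-- is the row's last character, A's row[position_index - 1] wraps around to the end of the
-- string, so A returns leftover text (the witness below returns its input unchanged) instead of reporting corruption;
-- B returns none there, the intended corrupted-line answer.
def D_check_incomplete_single_row (row : String) : Prop :=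
  ∃ i < row.toList.length, pvBalanced (row.toList.take i) ∧
    row.toList.getLast? = pvMatchOpen (row.toList.getD i ' ')
instance (row : String) : Decidable (D_check_incomplete_single_row row) := by
  unfold D_check_incomplete_single_row pvBalanced; infer_instance

def Spec_check_incomplete_single_row (row : String) (out : Option String) : Prop :=
  ¬ D_check_incomplete_single_row row → out = check_incomplete_single_row_alt row
instance (row : String) (out : Option String) : Decidable (Spec_check_incomplete_single_row row out) := by
  unfold Spec_check_incomplete_single_row; infer_instance

def pvDiffWitness_check_incomplete_single_row : String := ")("
def pvDiffWitnessOut_check_incomplete_single_row : (Option String) × (Option String) :=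
  (some ")(", none)

-- ===== CLAIM (what is proved, stated in full; the proofs are below) =====
def Claim_unchanged_check_incomplete_single_row : Prop := ∀ (row : String), Dom_check_incomplete_single_row row → Spec_check_incomplete_single_row row (check_incomplete_single_row row)
def Claim_changed_check_incomplete_single_row : Prop := Dom_check_incomplete_single_row (pvDiffWitness_check_incomplete_single_row) ∧ D_check_incomplete_single_row (pvDiffWitness_check_incomplete_single_row) ∧ check_incomplete_single_row (pvDiffWitness_check_incomplete_single_row) = pvDiffWitnessOut_check_incomplete_single_row.1 ∧ check_incomplete_single_row_alt (pvDiffWitness_check_incomplete_single_row) = pvDiffWitnessOut_check_incomplete_single_row.2 ∧ pvDiffWitnessOut_check_incomplete_single_row.1 ≠ pvDiffWitnessOut_check_incomplete_single_row.2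
def Claim_exact_check_incomplete_single_row : Prop := ∀ (row : String), Dom_check_incomplete_single_row row → D_check_incomplete_single_row row → check_incomplete_single_row row ≠ check_incomplete_single_row_alt row

-- ===== LEMMAS AND PROOFS =====

-- proof-side clean scan (stack of pending non-closers, top first): some st' = clean run
def pvScan : List Char → List Char → Option (List Char)
  | st, [] => some st
  | st, c :: r =>
    match pvMatchOpen c with
    | some p =>
      match st with
      | [] => none
      | t :: s => if t = p then pvScan s r else none
    | none => pvScan (c :: st) r

-- proof-side simulation of the joint scan; pvQuirk stack rest = true iff the reduction meets
-- a closer with nothing pending whose opener is the final character of the remaining text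
def pvQuirk : List Char → List Char → Bool
  | _, [] => false
  | stack, c :: r =>
    match pvMatchOpen c with
    | some p =>
      match stack with
      | [] => (c :: r).getLast? == some p
      | t :: s => if t = p then pvQuirk s r else false
    | none => pvQuirk (c :: stack) r

-- one unfolding step of A's loop once the current character is known
lemma pvLoopA_succ_open (n : Nat) (row : List Char) (idx : Int) (ch : Char)
    (h : PySem.List.pyGet? row idx = some ch) (hch : ch ∉ pvClosers) :
    pvLoopA (n + 1) row idx = pvLoopA n row (idx + 1) := by
  rw [pvLoopA]; simp only [h]; rw [if_neg hch]

lemma pvLoopA_succ_closer (n : Nat) (row : List Char) (idx : Int) (ch prev : Char)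
    (h : PySem.List.pyGet? row idx = some ch) (hch : ch ∈ pvClosers)
    (hp : PySem.List.pyGet? row (idx - 1) = some prev) :
    pvLoopA (n + 1) row idx =
      if prev ≠ pvPairA ch then none
      else pvLoopA n (pvRemoveFirst2 (pvPairA ch) ch row) (idx - 1) := by
  rw [pvLoopA]; simp only [h, hp]; rw [if_pos hch]

-- facts about the bracket tables
lemma pvOpen_facts {c p : Char} (h : pvMatchOpen c = some p) :
    c ∈ pvClosers ∧ p ∉ pvClosers ∧ p ≠ c ∧ pvPairA c = p := by
  unfold pvMatchOpen at h
  split at h <;> simp_all [pvClosers, pvPairA, pvMatchOpen] <;> subst h <;> decide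

lemma pvOpen_none {c : Char} (h : pvMatchOpen c = none) : c ∉ pvClosers := by
  unfold pvMatchOpen at h
  split at h <;> simp_all [pvClosers]

-- removeFirst2 facts
lemma pvRemove_head {l : List Char} {h : Char} (a b : Char)
    (hh : l.head? = some h) (hne : h ≠ a) :
    (pvRemoveFirst2 a b l).head? = some h := by
  match l with
  | [] => simp at hh
  | [x] => simp_all [pvRemoveFirst2]
  | x :: y :: ys =>
    simp at hh
    subst hh
    simp [pvRemoveFirst2, hne]

lemma pvRemove_last {a b t : Char} : ∀ {l : List Char},
    l.getLast? = some t → t ≠ b → (pvRemoveFirst2 a b l).getLast? = some t := by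
  intro l
  induction l with
  | nil => intro h; simp at h
  | cons x xs ih =>
    intro hl hne
    match xs, ih with
    | [], _ => simpa [pvRemoveFirst2] using hl
    | y :: ys, ih =>
      have hl' : (y :: ys).getLast? = some t := by
        simpa [List.getLast?_cons_cons] using hl
      rw [pvRemoveFirst2]
      split
      · next hcond =>
        obtain ⟨hx, hy⟩ := hcond
        cases ys with
        | nil => simp at hl'; subst hy; exact absurd hl'.symm (by simpa using hne)
        | cons z zs =>
          simpa [List.getLast?_cons_cons] using hl'
      · have hM := ih hl' hne
        cases hM' : pvRemoveFirst2 a b (y :: ys) with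
        | nil => rw [hM'] at hM; simp at hM
        | cons m ms =>
          rw [hM'] at hM
          simpa [List.getLast?_cons_cons] using hM

lemma pvRemove_at (a b : Char) (hb : b ∈ pvClosers) : ∀ (pre : List Char) (l : List Char),
    (∀ x ∈ pre, x ∉ pvClosers) → a ∉ pvClosers →
    pvRemoveFirst2 a b (pre ++ a :: b :: l) = pre ++ l := by
  intro pre
  induction pre with
  | nil => intro l _ _; simp [pvRemoveFirst2]
  | cons p ps ih =>
    intro l hpre ha
    have hy : ∀ y, (ps ++ a :: b :: l).head? = some y → y ≠ b := by
      intro y hy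
      cases ps with
      | nil => simp at hy; subst hy; intro h; exact ha (h ▸ hb)
      | cons q qs =>
        simp at hy; subst hy
        intro h
        exact hpre q (by simp) (h ▸ hb)
    cases hps : (ps ++ a :: b :: l) with
    | nil => cases ps <;> simp at hps
    | cons y rest =>
      have hyb : y ≠ b := hy y (by rw [hps]; rfl)
      rw [show p :: ps ++ a :: b :: l = p :: (ps ++ a :: b :: l) by simp, hps,
          pvRemoveFirst2]
      rw [if_neg (by rintro ⟨h1, h2⟩; exact hyb h2), ← hps,
          ih l (fun x hx => hpre x (by simp [hx])) ha]
      simp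

-- the ping-pong phase after the wraparound: A's index oscillates between 0 and -1 and the
-- loop always ends by returning the current row
lemma pvPingPong : ∀ (f : Nat) (row : List Char) (c p : Char),
    pvMatchOpen c = some p → row.head? = some c → row.getLast? = some p →
    ((pvLoopA f row 0).isSome = true ∧ (pvLoopA f row (-1)).isSome = true) := by
  intro f
  induction f with
  | zero => intro row c p _ _ _; simp [pvLoopA]
  | succ n ih =>
    intro row c p hm hh hl
    obtain ⟨hc, hpnc, hpc, hpa⟩ := pvOpen_facts hm
    cases row with
    | nil => simp at hh
    | cons x xs =>
      obtain rfl : x = c := by simpa using hh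
      constructor
      · rw [pvLoopA_succ_closer n _ 0 x p (by simp) hc
              (by rw [show (0 : Int) - 1 = -1 by norm_num, PySem.List.pyGet?_neg_one, hl]),
            if_neg (by simp [hpa]), show (0 : Int) - 1 = -1 by norm_num]
        have hh' : (pvRemoveFirst2 (pvPairA x) x (x :: xs)).head? = some x :=
          pvRemove_head _ _ (by rfl) (by rw [hpa]; exact fun h => hpc h.symm)
        have hl' : (pvRemoveFirst2 (pvPairA x) x (x :: xs)).getLast? = some p :=
          pvRemove_last hl hpc
        exact (ih _ x p hm hh' hl').2
      · rw [pvLoopA_succ_open n _ (-1) p (by rw [PySem.List.pyGet?_neg_one, hl])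
              (by simpa using hpnc), show (-1 : Int) + 1 = 0 by norm_num]
        exact (ih _ x p hm (by simp) hl).1

-- the main invariant: while the stack (= the already-scanned prefix, all non-closers) is
-- faithful, A's cursor loop and B's stack loop agree unless the wraparound quirk fires,
-- in which case A ends with some leftover row and B reports none
lemma pvMain : ∀ (rest stack : List Char), (∀ x ∈ stack, x ∉ pvClosers) →
    (pvQuirk stack rest = false →
      pvLoopA rest.length (stack.reverse ++ rest) (stack.length : Int) = pvLoopB stack rest)
    ∧ (pvQuirk stack rest = true →
      (pvLoopA rest.length (stack.reverse ++ rest) (stack.length : Int)).isSome = true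
        ∧ pvLoopB stack rest = none) := by
  intro rest
  induction rest with
  | nil =>
    intro stack _
    refine ⟨fun _ => ?_, fun hq => by simp [pvQuirk] at hq⟩
    simp [pvLoopA, pvLoopB]
  | cons c r ih =>
    intro stack hs
    have hget : PySem.List.pyGet? (stack.reverse ++ c :: r) (stack.length : Int) = some c := by
      have := PySem.List.pyGet?_append_length (pre := stack.reverse) (y := c) (ys := r)
      simpa using this
    rw [show (c :: r).length = r.length + 1 by simp]
    cases hm : pvMatchOpen c with
    | none =>
      have hcnc : c ∉ pvClosers := pvOpen_none hm
      have hrw : pvLoopA (r.length + 1) (stack.reverse ++ c :: r) (stack.length : Int)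
          = pvLoopA r.length ((c :: stack).reverse ++ r) ((c :: stack).length : Int) := by
        rw [pvLoopA_succ_open _ _ _ c hget hcnc,
            show stack.reverse ++ c :: r = (c :: stack).reverse ++ r by simp,
            show (stack.length : Int) + 1 = ((c :: stack).length : Int) by simp]
      have ih' := ih (c :: stack) (by
        intro x hx
        rw [List.mem_cons] at hx
        rcases hx with rfl | hx
        · exact hcnc
        · exact hs x hx)
      constructor
      · intro hq
        rw [hrw, ih'.1 (by simpa [pvQuirk, hm] using hq)]
        simp [pvLoopB, hm]
      · intro hq
        have := ih'.2 (by simpa [pvQuirk, hm] using hq)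
        exact ⟨by rw [hrw]; exact this.1, by simp [pvLoopB, hm, this.2]⟩
    | some p =>
      obtain ⟨hc, hpnc, hpc, hpa⟩ := pvOpen_facts hm
      cases stack with
      | nil =>
        have hq' : pvQuirk [] (c :: r) = ((c :: r).getLast? == some p) := by
          simp [pvQuirk, hm]
        obtain ⟨lastc, hlast⟩ : ∃ x, (c :: r).getLast? = some x := ⟨_, rfl⟩
        have hstep := pvLoopA_succ_closer r.length (c :: r) 0 c lastc
          (by simp) hc
          (by rw [show (0 : Int) - 1 = -1 by norm_num, PySem.List.pyGet?_neg_one, hlast])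
        constructor
        · intro hq
          rw [hq', hlast] at hq
          have hne : lastc ≠ p := by simpa using hq
          simp only [List.length_nil, Nat.cast_zero, List.reverse_nil, List.nil_append]
          rw [hstep, if_pos (by rw [hpa]; exact hne)]
          simp [pvLoopB, hm]
        · intro hq
          rw [hq', hlast] at hq
          have heq : lastc = p := by simpa using hq
          subst heq
          refine ⟨?_, by simp [pvLoopB, hm]⟩
          simp only [List.length_nil, Nat.cast_zero, List.reverse_nil, List.nil_append]
          rw [hstep, if_neg (by simp [hpa]), show (0 : Int) - 1 = -1 by norm_num]
          have hh' : (pvRemoveFirst2 (pvPairA c) c (c :: r)).head? = some c :=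
            pvRemove_head _ _ (by rfl) (by rw [hpa]; exact fun h => hpc h.symm)
          have hl' : (pvRemoveFirst2 (pvPairA c) c (c :: r)).getLast? = some lastc :=
            pvRemove_last hlast hpc
          exact (pvPingPong r.length _ c lastc hm hh' hl').2
      | cons t s =>
        have hsnc : ∀ x ∈ s, x ∉ pvClosers := fun x hx => hs x (by simp [hx])
        have htnc : t ∉ pvClosers := hs t (by simp)
        have hrow : (t :: s).reverse ++ c :: r = s.reverse ++ t :: c :: r := by simp
        have hgetp : PySem.List.pyGet? ((t :: s).reverse ++ c :: r)
            (((t :: s).length : Int) - 1) = some t := by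
          rw [hrow, show (((t :: s).length : Int) - 1) = ((s.reverse.length : Nat) : Int) by
            simp]
          exact PySem.List.pyGet?_append_length (pre := s.reverse) (y := t) (ys := c :: r)
        have hstep := pvLoopA_succ_closer r.length ((t :: s).reverse ++ c :: r)
          ((t :: s).length : Int) c t hget hc hgetp
        by_cases htp : t = p
        · subst htp
          have hrm : pvRemoveFirst2 (pvPairA c) c ((t :: s).reverse ++ c :: r)
              = s.reverse ++ r := by
            rw [hrow, hpa]
            exact pvRemove_at t c hc s.reverse r
              (by intro x hx; exact hsnc x (by simpa using hx)) htnc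
          have hrw : pvLoopA (r.length + 1) ((t :: s).reverse ++ c :: r)
              ((t :: s).length : Int)
              = pvLoopA r.length (s.reverse ++ r) ((s.length : Int)) := by
            rw [hstep, if_neg (by simp [hpa]), hrm,
                show ((t :: s).length : Int) - 1 = (s.length : Int) by simp]
          have ih' := ih s hsnc
          have hqeq : pvQuirk (t :: s) (c :: r) = pvQuirk s r := by
            simp [pvQuirk, hm]
          constructor
          · intro hq
            rw [hrw, ih'.1 (by rw [← hqeq]; exact hq)]
            simp [pvLoopB, hm]
          · intro hq
            have := ih'.2 (by rw [← hqeq]; exact hq)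
            exact ⟨by rw [hrw]; exact this.1, by simp [pvLoopB, hm, this.2]⟩
        · have hq : pvQuirk (t :: s) (c :: r) = false := by
            simp [pvQuirk, hm, htp]
          refine ⟨fun _ => ?_, fun h => by rw [hq] at h; exact absurd h (by simp)⟩
          rw [hstep, if_pos (by rw [hpa]; exact htp)]
          simp [pvLoopB, hm, htp]

-- ===== bridge: D_'s closed form ↔ the simulated scan =====

-- the fold step of pvBalanced, named for the proofs
def pvBStep : List Char → Char → List Char :=
  fun st c =>
    match pvMatchOpen c with
    | some p => if st.head? = some p then st.tail else [' ']
    | none => c :: st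

lemma pvBalanced_eq (l : List Char) :
    pvBalanced l ↔ l.foldl pvBStep [] = [] := Iff.rfl

-- the sentinel ' ' can never be popped: it survives the rest of the fold
lemma pvSpace_sticks : ∀ (l st : List Char), ' ' ∈ st → ' ' ∈ l.foldl pvBStep st := by
  intro l
  induction l with
  | nil => intro st h; simpa using h
  | cons c r ih =>
    intro st h
    rw [List.foldl_cons]
    refine ih _ ?_
    unfold pvBStep
    cases hm : pvMatchOpen c with
    | none => simp [h]
    | some p =>
      dsimp only
      by_cases hh : st.head? = some p
      · rw [if_pos hh]
        cases st with
        | nil => simp at hh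
        | cons x xs =>
          simp at hh
          subst hh
          rcases List.mem_cons.mp h with rfl | h'
          · exfalso; unfold pvMatchOpen at hm; split at hm <;> simp_all
          · simpa using h'
      · rw [if_neg hh]; simp

-- clean scans compute the fold; failed scans leave the sentinel behind
lemma pvScan_fold : ∀ (l st : List Char),
    (∀ st', pvScan st l = some st' → l.foldl pvBStep st = st')
    ∧ (pvScan st l = none → ' ' ∈ l.foldl pvBStep st) := by
  intro l
  induction l with
  | nil =>
    intro st
    exact ⟨fun st' h => by simpa [pvScan] using h, fun h => by simp [pvScan] at h⟩
  | cons c r ih =>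
    intro st
    rw [List.foldl_cons]
    cases hm : pvMatchOpen c with
    | none =>
      have hstep : pvBStep st c = c :: st := by unfold pvBStep; rw [hm]
      rw [hstep]
      exact ⟨fun st' h => (ih (c :: st)).1 st' (by simpa [pvScan, hm] using h),
             fun h => (ih (c :: st)).2 (by simpa [pvScan, hm] using h)⟩
    | some p =>
      cases st with
      | nil =>
        have hstep : pvBStep [] c = [' '] := by unfold pvBStep; rw [hm]; simp
        rw [hstep]
        exact ⟨fun st' h => by simp [pvScan, hm] at h,
               fun _ => pvSpace_sticks r [' '] (by simp)⟩
      | cons t s =>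
        by_cases htp : t = p
        · subst htp
          have hstep : pvBStep (t :: s) c = s := by unfold pvBStep; rw [hm]; simp
          rw [hstep]
          exact ⟨fun st' h => (ih s).1 st' (by simpa [pvScan, hm] using h),
                 fun h => (ih s).2 (by simpa [pvScan, hm] using h)⟩
        · have hstep : pvBStep (t :: s) c = [' '] := by
            unfold pvBStep; rw [hm]; simp [htp]
          rw [hstep]
          exact ⟨fun st' h => by simp [pvScan, hm, htp] at h,
                 fun _ => pvSpace_sticks r [' '] (by simp)⟩

lemma pvBalanced_iff_scan (l : List Char) : pvBalanced l ↔ pvScan [] l = some [] := by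
  rw [pvBalanced_eq]
  constructor
  · intro h
    cases hsc : pvScan [] l with
    | none =>
      have := (pvScan_fold l []).2 hsc
      rw [h] at this
      simp at this
    | some st' =>
      rw [(pvScan_fold l []).1 st' hsc] at h
      exact congrArg some h
  · intro h
    exact (pvScan_fold l []).1 [] h

-- a nonempty suffix has the same last element as the whole list
lemma pvDrop_getLast {l : List Char} {p : Nat} (hp : p < l.length) :
    (l.drop p).getLast? = l.getLast? := by
  have hne : l.drop p ≠ [] := by
    simp only [ne_eq, List.drop_eq_nil_iff]
    omega
  conv_rhs => rw [← List.take_append_drop p l]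
  rw [List.getLast?_append]
  cases hL : (l.drop p).getLast? with
  | none => exact absurd (List.getLast?_eq_none_iff.mp hL) hne
  | some x => simp

-- the quirk fires iff some clean scan of a prefix empties the stack right before a closer
-- whose opener is the last character of the remaining text
lemma pvQuirk_iff : ∀ (rest stack : List Char),
    pvQuirk stack rest = true ↔
      ∃ i < rest.length, pvScan stack (rest.take i) = some [] ∧
        (rest.drop i).getLast? = pvMatchOpen (rest.getD i ' ') := by
  intro rest
  induction rest with
  | nil =>
    intro stack
    simp [pvQuirk]
  | cons c r ih =>
    intro stack
    cases hm : pvMatchOpen c with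
    | none =>
      rw [show pvQuirk stack (c :: r) = pvQuirk (c :: stack) r by simp [pvQuirk, hm],
          ih (c :: stack)]
      constructor
      · rintro ⟨i, hi, hsc, hlast⟩
        exact ⟨i + 1, by simpa using hi, by simpa [pvScan, hm] using hsc, by simpa using hlast⟩
      · rintro ⟨i, hi, hsc, hlast⟩
        cases i with
        | zero =>
          simp only [List.take_zero, pvScan] at hsc
          obtain rfl : stack = [] := by simpa using hsc
          rw [List.drop_zero, List.getD_cons_zero, hm] at hlast
          simp at hlast
        | succ j =>
          exact ⟨j, by simpa using hi, by simpa [pvScan, hm] using hsc, by simpa using hlast⟩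
    | some p =>
      cases stack with
      | nil =>
        rw [show pvQuirk [] (c :: r) = ((c :: r).getLast? == some p) by simp [pvQuirk, hm]]
        constructor
        · intro hq
          refine ⟨0, by simp, by simp [pvScan], ?_⟩
          rw [List.drop_zero, List.getD_cons_zero, hm]
          exact eq_of_beq hq
        · rintro ⟨i, hi, hsc, hlast⟩
          cases i with
          | zero =>
            rw [List.drop_zero, List.getD_cons_zero, hm] at hlast
            simpa using hlast
          | succ j =>
            simp only [List.take_succ_cons, pvScan, hm] at hsc
            exact absurd hsc (by simp)
      | cons t s =>
        by_cases htp : t = p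
        · subst htp
          rw [show pvQuirk (t :: s) (c :: r) = pvQuirk s r by simp [pvQuirk, hm], ih s]
          constructor
          · rintro ⟨i, hi, hsc, hlast⟩
            exact ⟨i + 1, by simpa using hi, by simpa [pvScan, hm] using hsc,
                   by simpa using hlast⟩
          · rintro ⟨i, hi, hsc, hlast⟩
            cases i with
            | zero =>
              simp only [List.take_zero, pvScan] at hsc
              simp at hsc
            | succ j =>
              exact ⟨j, by simpa using hi, by simpa [pvScan, hm] using hsc,
                     by simpa using hlast⟩
        · rw [show pvQuirk (t :: s) (c :: r) = false by simp [pvQuirk, hm, htp]]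
          constructor
          · intro h; simp at h
          · rintro ⟨i, hi, hsc, hlast⟩
            cases i with
            | zero =>
              simp only [List.take_zero, pvScan] at hsc
              simp at hsc
            | succ j =>
              simp only [List.take_succ_cons, pvScan, hm, if_neg htp] at hsc
              exact absurd hsc (by simp)

-- D_ is exactly the quirk of the joint scan started from the empty stack
lemma pvD_iff_quirk (row : String) :
    D_check_incomplete_single_row row ↔ pvQuirk [] row.toList = true := by
  rw [pvQuirk_iff row.toList []]
  unfold D_check_incomplete_single_row
  constructor
  · rintro ⟨i, hi, hbal, hlast⟩
    exact ⟨i, hi, (pvBalanced_iff_scan _).mp hbal, by rw [pvDrop_getLast hi]; exact hlast⟩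
  · rintro ⟨i, hi, hsc, hlast⟩
    exact ⟨i, hi, (pvBalanced_iff_scan _).mpr hsc, by rw [← pvDrop_getLast hi]; exact hlast⟩


-- ===== a linear-time decision procedure for D_ (the ∃-form instance is quadratic) =====

-- pvQuirk with the last character passed in instead of recomputed at the event
def pvQuirkL (L : Option Char) : List Char → List Char → Bool
  | _, [] => false
  | st, c :: r =>
    match pvMatchOpen c with
    | some p =>
      match st with
      | [] => L == some p
      | t :: s => if t = p then pvQuirkL L s r else false
    | none => pvQuirkL L (c :: st) r

-- the same scan as a left fold (Sum.inl = finished, Sum.inr = pending stack)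
def pvFStep (L : Option Char) : Sum Bool (List Char) → Char → Sum Bool (List Char)
  | Sum.inl b, _ => Sum.inl b
  | Sum.inr st, c =>
    match pvMatchOpen c with
    | some p =>
      match st with
      | [] => Sum.inl (L == some p)
      | t :: s => if t = p then Sum.inr s else Sum.inl false
    | none => Sum.inr (c :: st)

def pvLastF (l : List Char) : Option Char := l.foldl (fun _ c => some c) none

def pvDFast (row : String) : Bool :=
  match row.toList.foldl (pvFStep (pvLastF row.toList)) (Sum.inr []) with
  | Sum.inl b => b
  | Sum.inr _ => false

lemma pvLastF_eq : ∀ (l : List Char) (i : Option Char),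
    l.foldl (fun _ c => some c) i = if l = [] then i else l.getLast? := by
  intro l
  induction l with
  | nil => intro i; simp
  | cons c r ih =>
    intro i
    rw [List.foldl_cons, ih (some c)]
    cases r with
    | nil => simp
    | cons d t => simp [List.getLast?_cons_cons]

lemma pvFStep_absorb (L : Option Char) (b : Bool) :
    ∀ (l : List Char), l.foldl (pvFStep L) (Sum.inl b) = Sum.inl b := by
  intro l
  induction l with
  | nil => rfl
  | cons c r ih => rw [List.foldl_cons]; exact ih

lemma pvFold_quirkL (L : Option Char) : ∀ (rest st : List Char),
    (rest.foldl (pvFStep L) (Sum.inr st) = Sum.inl true) ↔ pvQuirkL L st rest = true := by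
  intro rest
  induction rest with
  | nil => intro st; simp [pvQuirkL]
  | cons c r ih =>
    intro st
    rw [List.foldl_cons]
    cases hm : pvMatchOpen c with
    | none =>
      rw [show pvFStep L (Sum.inr st) c = Sum.inr (c :: st) by simp [pvFStep, hm],
          show pvQuirkL L st (c :: r) = pvQuirkL L (c :: st) r by simp [pvQuirkL, hm]]
      exact ih (c :: st)
    | some p =>
      cases st with
      | nil =>
        rw [show pvFStep L (Sum.inr []) c = Sum.inl (L == some p) by simp [pvFStep, hm],
            pvFStep_absorb,
            show pvQuirkL L [] (c :: r) = (L == some p) by simp [pvQuirkL, hm]]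
        simp
      | cons t s =>
        by_cases htp : t = p
        · subst htp
          rw [show pvFStep L (Sum.inr (t :: s)) c = Sum.inr s by
                simp [pvFStep, hm],
              show pvQuirkL L (t :: s) (c :: r) = pvQuirkL L s r by simp [pvQuirkL, hm]]
          exact ih s
        · rw [show pvFStep L (Sum.inr (t :: s)) c = Sum.inl false by
                simp [pvFStep, hm, htp],
              pvFStep_absorb,
              show pvQuirkL L (t :: s) (c :: r) = false by simp [pvQuirkL, hm, htp]]
          simp
lemma pvQuirkL_quirk : ∀ (rest st : List Char) (L : Option Char),
    (rest ≠ [] → L = rest.getLast?) → pvQuirkL L st rest = pvQuirk st rest := by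
  intro rest
  induction rest with
  | nil => intro st L _; rfl
  | cons c r ih =>
    intro st L hL
    have hL' : L = (c :: r).getLast? := hL (by simp)
    have hr : r ≠ [] → L = r.getLast? := by
      intro hne
      rw [hL']
      cases r with
      | nil => exact absurd rfl hne
      | cons d t => simp [List.getLast?_cons_cons]
    cases hm : pvMatchOpen c with
    | none =>
      rw [show pvQuirkL L st (c :: r) = pvQuirkL L (c :: st) r by simp [pvQuirkL, hm],
          show pvQuirk st (c :: r) = pvQuirk (c :: st) r by simp [pvQuirk, hm]]
      exact ih (c :: st) L hr
    | some p =>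
      cases st with
      | nil =>
        rw [show pvQuirkL L [] (c :: r) = (L == some p) by simp [pvQuirkL, hm],
            show pvQuirk [] (c :: r) = ((c :: r).getLast? == some p) by simp [pvQuirk, hm],
            hL']
      | cons t s =>
        by_cases htp : t = p
        · subst htp
          rw [show pvQuirkL L (t :: s) (c :: r) = pvQuirkL L s r by simp [pvQuirkL, hm],
              show pvQuirk (t :: s) (c :: r) = pvQuirk s r by simp [pvQuirk, hm]]
          exact ih s L hr
        · rw [show pvQuirkL L (t :: s) (c :: r) = false by simp [pvQuirkL, hm, htp],
              show pvQuirk (t :: s) (c :: r) = false by simp [pvQuirk, hm, htp]]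

lemma pvDFast_iff (row : String) : pvDFast row = true ↔ D_check_incomplete_single_row row := by
  have h1 : pvDFast row = true ↔
      row.toList.foldl (pvFStep (pvLastF row.toList)) (Sum.inr []) = Sum.inl true := by
    unfold pvDFast
    cases h : row.toList.foldl (pvFStep (pvLastF row.toList)) (Sum.inr []) with
    | inl b => cases b <;> simp
    | inr st => simp
  rw [h1, pvFold_quirkL, pvQuirkL_quirk row.toList [] _ ?_, ← pvD_iff_quirk]
  intro hne
  rw [pvLastF, pvLastF_eq, if_neg hne]

instance (row : String) : Decidable (D_check_incomplete_single_row row) :=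
  decidable_of_iff _ (pvDFast_iff row)

-- ===== VERDICT (by name: the statement is the Claim_ definition above) =====
theorem check_incomplete_single_row_spec : Claim_unchanged_check_incomplete_single_row := by
  intro row _ hD
  have hq : pvQuirk [] row.toList = false := by
    cases hq' : pvQuirk [] row.toList with
    | false => rfl
    | true => exact absurd ((pvD_iff_quirk row).mpr hq') hD
  have h := (pvMain row.toList [] (by simp)).1 hq
  unfold check_incomplete_single_row check_incomplete_single_row_alt
  simp only [List.reverse_nil, List.nil_append, List.length_nil, Nat.cast_zero] at h
  rw [h]

theorem check_incomplete_single_row_changed : Claim_changed_check_incomplete_single_row := by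
  unfold Claim_changed_check_incomplete_single_row; decide

theorem check_incomplete_single_row_tight : Claim_exact_check_incomplete_single_row := by
  intro row _ hD
  have hq := (pvD_iff_quirk row).mp hD
  have h := (pvMain row.toList [] (by simp)).2 hq
  unfold check_incomplete_single_row check_incomplete_single_row_alt
  simp only [List.reverse_nil, List.nil_append, List.length_nil, Nat.cast_zero] at h
  rw [h.2]
  intro hcon
  have hnone : pvLoopA row.toList.length row.toList 0 = none := by
    simpa [Option.map_eq_none_iff] using hcon
  rw [hnone] at h
  simp at h
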